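-- pv_equiv track=rewrite | github.com/boxucu/aoc-2024 | day_22_Pseudorandom_Number_Generator.py | price_list_gen
-- ===== SOURCE A (Python) =====
-- def mixing(secret, value):
--     return secret ^ value
--
-- def pruning(secret):
--     return secret % 16777216
--
-- def process_part1(secret):
--     value = secret * 64
--     secret = mixing(secret, value)
--     secret = pruning(secret)
--
--     value = secret // 32
--     secret = mixing(secret, value)
--     secret = pruning(secret)
--
--     value = secret * 2048
--     secret = mixing(secret, value)
--     secret = pruning(secret)
--     return secret
--
-- def price_list_gen(secret, finial_step):
--     price_0 = secret % 10
--     price_list = [price_0]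
--     change_list = []
--     step = 0
--     while step < finial_step:
--         step += 1
--         secret = process_part1(secret)
--         price = secret % 10
--
--         change_list.append(price - price_list[-1])
--         price_list.append(price)
--     return price_list, change_list
-- ===== SOURCE B (Python) =====
-- def mixing(secret, value):
--     return secret ^ value
--
-- def pruning(secret):
--     return secret % 16777216
--
-- def process_part1(secret):
--     value = secret * 64
--     secret = mixing(secret, value)
--     secret = pruning(secret)
--
--     value = secret // 32
--     secret = mixing(secret, value)
--     secret = pruning(secret)
--
--     value = secret * 2048
--     secret = mixing(secret, value)
--     secret = pruning(secret)
--     return secret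
--
-- def price_list_gen(secret, finial_step):
--     # Cycle-detecting generator: remember each secret's first step index; when a
--     # secret repeats, the sequence is periodic from there, so the remaining
--     # prices are copied from the already-computed period instead of being
--     # regenerated by the PRNG.
--     prices = [secret % 10]
--     seen = {}
--     s = secret
--     k = 0
--     while k < finial_step:
--         if s in seen:
--             i = seen[s]
--             p = k - i
--             for m in range(k + 1, finial_step + 1):
--                 prices.append(prices[i + (m - i) % p])
--             break
--         seen[s] = k
--         s = process_part1(s)
--         k += 1
--         prices.append(s % 10)
--     changes = [prices[j + 1] - prices[j] for j in range(len(prices) - 1)]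
--     return prices, changes
-- ===== Notes on version B (the rewrite author's own statement) =====
-- stated objective: alternative
-- what changed: B replaces A's run-the-PRNG-every-step loop by a cycle-detecting generator: it records each secret's first step index in a dict and, once a secret repeats, fills the remaining prices by modular indexing into the already-computed period instead of iterating the PRNG; the change list is then derived in a separate indexed pass.
import Mathlib
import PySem

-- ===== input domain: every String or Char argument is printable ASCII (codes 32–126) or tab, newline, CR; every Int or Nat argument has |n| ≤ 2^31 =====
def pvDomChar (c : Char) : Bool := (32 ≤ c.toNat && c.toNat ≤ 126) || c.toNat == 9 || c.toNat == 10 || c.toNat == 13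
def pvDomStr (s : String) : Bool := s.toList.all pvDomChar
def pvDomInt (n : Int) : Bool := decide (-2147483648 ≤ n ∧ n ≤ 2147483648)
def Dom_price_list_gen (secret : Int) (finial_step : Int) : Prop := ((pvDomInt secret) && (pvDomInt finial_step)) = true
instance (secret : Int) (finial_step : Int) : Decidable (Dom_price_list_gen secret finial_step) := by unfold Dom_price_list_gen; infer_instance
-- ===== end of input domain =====

-- B replaces A's step-by-step PRNG loop by a cycle-detecting generator: it remembers the first
-- step index of every secret in a dict and, once a secret repeats, copies the remaining prices
-- from the already-computed period instead of running the PRNG further (objective: alternative).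

-- ===== PORT A =====
def mixing (secret value : Int) : Int := PySem.Int.bxor secret value

def pruning (secret : Int) : Int := PySem.Int.mod secret 16777216

def process_part1 (secret : Int) : Int :=
  let secret := pruning (mixing secret (secret * 64))
  let secret := pruning (mixing secret (PySem.Int.floordiv secret 32))
  let secret := pruning (mixing secret (secret * 2048))
  secret

-- A's while loop: state (secret, price_list, change_list), one recursive call per step
def priceLoopA : Nat → Int → List Int → List Int → List Int × List Int
  | 0, _, price_list, change_list => (price_list, change_list)
  | n + 1, secret, price_list, change_list =>
      let secret := process_part1 secret
      let price := PySem.Int.mod secret 10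
      priceLoopA n secret (price_list ++ [price]) (change_list ++ [price - price_list.getLastD 0])

def price_list_gen (secret : Int) (finial_step : Int) : List Int × List Int :=
  let price_0 := PySem.Int.mod secret 10
  priceLoopA finial_step.toNat secret [price_0] []

-- ===== PORT B =====
def mixing_alt (secret value : Int) : Int := PySem.Int.bxor secret value

def pruning_alt (secret : Int) : Int := PySem.Int.mod secret 16777216

def process_part1_alt (secret : Int) : Int :=
  let secret := pruning_alt (mixing_alt secret (secret * 64))
  let secret := pruning_alt (mixing_alt secret (PySem.Int.floordiv secret 32))
  let secret := pruning_alt (mixing_alt secret (secret * 2048))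
  secret

-- B's main while loop; fuel = number of remaining iterations (k counts up to finial_step).
-- On a repeated secret it fills the remaining prices from the detected period (the 'break' arm);
-- the indices read are always in range, so pyGetD's default is never used.
def loopB (fin : Int) : Nat → Int → Int → PySem.Dict Int Int → List Int → List Int
  | 0, _, _, _, prices => prices
  | fuel + 1, s, k, seen, prices =>
      match seen.get? s with
      | some i =>
          let p := k - i
          (PySem.List.pyRange (k + 1) (fin + 1) 1).foldl
            (fun acc m => acc ++ [PySem.List.pyGetD acc (i + PySem.Int.mod (m - i) p) 0]) prices
      | none =>
          let seen := seen.insert s k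
          let s' := process_part1_alt s
          loopB fin fuel s' (k + 1) seen (prices ++ [PySem.Int.mod s' 10])

def price_list_gen_alt (secret : Int) (finial_step : Int) : List Int × List Int :=
  let prices := loopB finial_step finial_step.toNat secret 0 PySem.Dict.empty [PySem.Int.mod secret 10]
  let changes := (PySem.List.pyRange 0 (PySem.List.len prices - 1) 1).map
      (fun j => PySem.List.pyGetD prices (j + 1) 0 - PySem.List.pyGetD prices j 0)
  (prices, changes)

-- ===== PRECONDITION & SPEC =====
def Spec_price_list_gen (secret : Int) (finial_step : Int) (out : List Int × List Int) : Prop := out = price_list_gen_alt secret finial_step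
instance (secret : Int) (finial_step : Int) (out : List Int × List Int) : Decidable (Spec_price_list_gen secret finial_step out) := by unfold Spec_price_list_gen; infer_instance

-- ===== CLAIM (what is proved, stated in full; the proofs are below) =====
def Claim_equal_price_list_gen : Prop := ∀ (secret : Int) (finial_step : Int), Dom_price_list_gen secret finial_step → Spec_price_list_gen secret finial_step (price_list_gen secret finial_step)

-- ===== LEMMAS AND PROOFS =====

-- the secret after j PRNG steps, its price, and the j-th change
def iterS (secret : Int) : Nat → Int
  | 0 => secret
  | j + 1 => process_part1 (iterS secret j)

def qseq (secret : Int) (j : Nat) : Int := PySem.Int.mod (iterS secret j) 10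

def dseq (secret : Int) (j : Nat) : Int := qseq secret (j + 1) - qseq secret j

-- ---- A's loop computes the canonical lists ----
theorem loopA_eq (secret : Int) : ∀ (n k : Nat),
    priceLoopA n (iterS secret k) ((List.range (k + 1)).map (qseq secret))
      ((List.range k).map (dseq secret))
    = ((List.range (k + n + 1)).map (qseq secret), (List.range (k + n)).map (dseq secret)) := by
  intro n
  induction n with
  | zero => intro k; simp [priceLoopA]
  | succ n ih =>
      intro k
      simp only [priceLoopA]
      have hs : process_part1 (iterS secret k) = iterS secret (k + 1) := rfl
      have hlast : ((List.range (k + 1)).map (qseq secret)).getLastD 0 = qseq secret k := by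
        simp [List.range_succ]
      have hq : PySem.Int.mod (iterS secret (k + 1)) 10 = qseq secret (k + 1) := rfl
      rw [hs, hlast, hq]
      have h1 : (List.range (k + 1)).map (qseq secret) ++ [qseq secret (k + 1)]
          = (List.range (k + 2)).map (qseq secret) := by
        simp [List.range_succ]
      have h2 : (List.range k).map (dseq secret) ++ [qseq secret (k + 1) - qseq secret k]
          = (List.range (k + 1)).map (dseq secret) := by
        simp [List.range_succ, dseq]
      rw [h1, h2]
      have := ih (k + 1)
      simpa [show k + 1 + n + 1 = k + n + 2 from by omega,
             show k + 1 + n = k + n + 1 from by omega,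
             show k + 2 = k + 1 + 1 from by omega] using this

theorem A_closed (secret fin : Int) :
    price_list_gen secret fin
      = ((List.range (fin.toNat + 1)).map (qseq secret),
         (List.range fin.toNat).map (dseq secret)) := by
  have := loopA_eq secret fin.toNat 0
  simpa [price_list_gen, List.range_succ, qseq] using this

-- ---- periodicity of the iterates ----
theorem iter_shift_eq (s : Int) (a b : Nat) (h : iterS s a = iterS s b) :
    ∀ d, iterS s (a + d) = iterS s (b + d) := by
  intro d
  induction d with
  | zero => simpa using h
  | succ d ih =>
      show iterS s ((a + d) + 1) = iterS s ((b + d) + 1)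
      simp [iterS, ih]

theorem iter_mod (s : Int) (i k : Nat) (hik : i < k) (h : iterS s i = iterS s k) :
    ∀ e, iterS s (i + e % (k - i)) = iterS s (i + e) := by
  intro e
  induction e using Nat.strong_induction_on with
  | _ e ih =>
    by_cases he : e < k - i
    · rw [Nat.mod_eq_of_lt he]
    · have hp : 0 < k - i := by omega
      have h1 : e % (k - i) = (e - (k - i)) % (k - i) := by
        conv_lhs => rw [show e = (e - (k - i)) + (k - i) from by omega]
        exact Nat.add_mod_right _ _
      have h2 : iterS s (i + (e - (k - i))) = iterS s (i + e) := by
        have := iter_shift_eq s k i h.symm (e - (k - i))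
        calc iterS s (i + (e - (k - i))) = iterS s (k + (e - (k - i))) := this.symm
          _ = iterS s (i + e) := by rw [show k + (e - (k - i)) = i + e from by omega]
      rw [h1, ih (e - (k - i)) (by omega), h2]

-- ---- the fill loop of B, after a cycle is found ----
theorem fill_eq (secret fin : Int) (i k : Nat) (hik : i < k)
    (hper : iterS secret i = iterS secret k) :
    ∀ (d : Nat) (c : Nat), k ≤ c → (c : Int) ≤ fin → fin.toNat - c = d →
    (PySem.List.pyRange ((c : Int) + 1) (fin + 1) 1).foldl
      (fun acc m => acc ++ [PySem.List.pyGetD acc ((i : Int) + PySem.Int.mod (m - (i : Int)) ((k : Int) - (i : Int))) 0])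
      ((List.range (c + 1)).map (qseq secret))
    = (List.range (fin.toNat + 1)).map (qseq secret) := by
  intro d
  induction d with
  | zero =>
      intro c hkc hcf hd
      have h0 : (0 : Int) ≤ fin := le_trans (by positivity) hcf
      have hc : c = fin.toNat := by omega
      rw [PySem.List.pyRange_one_eq_nil (by omega), List.foldl_nil, hc]
  | succ d ih =>
      intro c hkc hcf hd
      have h0 : (0 : Int) ≤ fin := le_trans (by positivity) hcf
      have hclt : c < fin.toNat := by omega
      have hcl : (c : Int) + 1 < fin + 1 := by omega
      rw [PySem.List.pyRange_one_cons hcl, List.foldl_cons]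
      -- the element appended at index c+1
      have hcast : (c : Int) + 1 - (i : Int) = ((c + 1 - i : Nat) : Int) := by omega
      have hkcast : (k : Int) - (i : Int) = ((k - i : Nat) : Int) := by omega
      have hidx : (i : Int) + PySem.Int.mod ((c : Int) + 1 - (i : Int)) ((k : Int) - (i : Int))
          = ((i + (c + 1 - i) % (k - i) : Nat) : Int) := by
        rw [hcast, hkcast, PySem.Int.mod_natCast]; omega
      have hlt : i + (c + 1 - i) % (k - i) < c + 1 := by
        have := Nat.mod_lt (c + 1 - i) (y := k - i) (by omega)
        omega
      have hget : PySem.List.pyGetD ((List.range (c + 1)).map (qseq secret))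
            ((i : Int) + PySem.Int.mod ((c : Int) + 1 - (i : Int)) ((k : Int) - (i : Int))) 0
          = qseq secret (c + 1) := by
        rw [hidx, PySem.List.pyGetD_natCast]
        have := iter_mod secret i k hik hper (c + 1 - i)
        have hiter : iterS secret (i + (c + 1 - i) % (k - i)) = iterS secret (c + 1) := by
          rw [this, show i + (c + 1 - i) = c + 1 from by omega]
        simp [List.getD_eq_getElem?_getD, List.getElem?_map,
              List.getElem?_range hlt, qseq, hiter]
      rw [hget]
      have happ : (List.range (c + 1)).map (qseq secret) ++ [qseq secret (c + 1)]
          = (List.range (c + 1 + 1)).map (qseq secret) := by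
        simp [List.range_succ]
      rw [happ]
      have := ih (c + 1) (by omega) (by push_cast; omega) (by omega)
      simpa [show ((c + 1 : Nat) : Int) = (c : Int) + 1 from by push_cast; ring] using this

-- ---- B's main loop computes the canonical price list ----
theorem loopB_eq (secret fin : Int) (h0 : 0 ≤ fin) :
    ∀ (fuel k : Nat) (seen : PySem.Dict Int Int),
    fuel = fin.toNat - k → k ≤ fin.toNat →
    (∀ x v, seen.get? x = some v → ∃ j : Nat, v = (j : Int) ∧ j < k ∧ iterS secret j = x) →
    loopB fin fuel (iterS secret k) (k : Int) seen ((List.range (k + 1)).map (qseq secret))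
    = (List.range (fin.toNat + 1)).map (qseq secret) := by
  intro fuel
  induction fuel with
  | zero =>
      intro k seen hfuel hk _
      have : k = fin.toNat := by omega
      simp [loopB, this]
  | succ fuel ih =>
      intro k seen hfuel hk hseen
      have hklt : k < fin.toNat := by omega
      cases hget : seen.get? (iterS secret k) with
      | some i =>
          simp only [loopB, hget]
          obtain ⟨j, hj, hjk, hiter⟩ := hseen _ _ hget
          simp only [hj]
          exact fill_eq secret fin j k hjk hiter (fin.toNat - k) k le_rfl
            (by omega) rfl
      | none =>
          simp only [loopB, hget]
          have hs' : process_part1_alt (iterS secret k) = iterS secret (k + 1) := rfl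
          have hq : PySem.Int.mod (iterS secret (k + 1)) 10 = qseq secret (k + 1) := rfl
          rw [hs', hq]
          have happ : (List.range (k + 1)).map (qseq secret) ++ [qseq secret (k + 1)]
              = (List.range (k + 1 + 1)).map (qseq secret) := by
            simp [List.range_succ]
          rw [happ]
          have hcast : (k : Int) + 1 = ((k + 1 : Nat) : Int) := by push_cast; ring
          rw [hcast]
          apply ih (k + 1) _ (by omega) (by omega)
          intro x v hv
          rw [PySem.Dict.get?_insert] at hv
          by_cases hx : x = iterS secret k
          · simp [hx] at hv
            exact ⟨k, hv.symm, by omega, hx.symm⟩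
          · simp [hx] at hv
            obtain ⟨j, hj, hjk, hiter⟩ := hseen x v hv
            exact ⟨j, hj, by omega, hiter⟩

-- ---- B's change pass on the canonical price list ----
theorem changes_eq (secret : Int) (n : Nat) :
    (PySem.List.pyRange 0 (PySem.List.len ((List.range (n + 1)).map (qseq secret)) - 1) 1).map
      (fun j => PySem.List.pyGetD ((List.range (n + 1)).map (qseq secret)) (j + 1) 0
              - PySem.List.pyGetD ((List.range (n + 1)).map (qseq secret)) j 0)
    = (List.range n).map (dseq secret) := by
  have hlen : PySem.List.len ((List.range (n + 1)).map (qseq secret)) - 1 = (n : Int) := by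
    simp [PySem.List.len_eq]
  rw [hlen, PySem.List.pyRange_zero_natCast, List.map_map]
  apply List.map_congr_left
  intro j hj
  have hjn : j < n := List.mem_range.mp hj
  have h1 : ((j : Int) + 1) = ((j + 1 : Nat) : Int) := by push_cast; ring
  simp only [Function.comp, h1, PySem.List.pyGetD_natCast]
  simp [List.getD_eq_getElem?_getD, List.getElem?_map,
        List.getElem?_range (show j + 1 < n + 1 from by omega),
        List.getElem?_range (show j < n + 1 from by omega), dseq]

theorem B_closed (secret fin : Int) :
    price_list_gen_alt secret fin
      = ((List.range (fin.toNat + 1)).map (qseq secret),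
         (List.range fin.toNat).map (dseq secret)) := by
  have hprices : loopB fin fin.toNat secret 0 PySem.Dict.empty [PySem.Int.mod secret 10]
      = (List.range (fin.toNat + 1)).map (qseq secret) := by
    by_cases h0 : 0 ≤ fin
    · have := loopB_eq secret fin h0 fin.toNat 0 PySem.Dict.empty (by omega) (by omega)
        (by intro x v hv; simp [PySem.Dict.get?_empty] at hv)
      simpa [List.range_succ, qseq, iterS] using this
    · have : fin.toNat = 0 := by omega
      simp [this, loopB, List.range_succ, qseq, iterS]
  simp only [price_list_gen_alt, hprices, changes_eq]

-- ===== VERDICT (by name: the statement is the Claim_ definition above) =====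
theorem price_list_gen_spec : Claim_equal_price_list_gen := by
  intro secret fin _
  unfold Spec_price_list_gen
  rw [A_closed, B_closed]
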